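-- pv_equiv track=rewrite | github.com/alwaysmaysix/MangaScraper | modules/Comick.py | rename_chapter
-- ===== SOURCE A (Python) =====
-- def rename_chapter(chapter):
--     chapter = chapter.split('-', 1)[1]
--     new_name = ''
--     reached_number = False
--     for ch in chapter:
--         if ch.isdigit():
--             new_name += ch
--             reached_number = True
--         elif ch in '-.' and reached_number and new_name[-1] != '.':
--             new_name += '.'
--     if not reached_number:
--         return chapter
--     new_name = new_name.rstrip('.')
--     try:
--         return f'Chapter {int(new_name):03d}'
--     except:
--         return f'Chapter {new_name.split(".", 1)[0].zfill(3)}.{new_name.split(".", 1)[1]}'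
-- ===== SOURCE B (Python) =====
-- def _sep_index(s):
--     for i, c in enumerate(s):
--         if c in '-.':
--             return i
--     return None
--
-- def rename_chapter(chapter):
--     chapter = chapter.split('-', 1)[1]
--     parts = []
--     rest = chapter
--     while True:
--         i = _sep_index(rest)
--         seg = rest if i is None else rest[:i]
--         g = ''.join(ch for ch in seg if ch.isdigit())
--         if g:
--             parts.append(g)
--         if i is None:
--             break
--         rest = rest[i + 1:]
--     if not parts:
--         return chapter
--     new_name = '.'.join(parts)
--     try:
--         return f'Chapter {int(new_name):03d}'
--     except:
--         return f'Chapter {new_name.split(".", 1)[0].zfill(3)}.{new_name.split(".", 1)[1]}'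
-- ===== Notes on version B (the rewrite author's own statement) =====
-- stated objective: alternative
-- what changed: A's single-pass character state machine (new_name string built char by char with a reached_number flag, dot-dedup via new_name[-1] and a trailing rstrip('.')) is replaced by a staged cut-at-separator loop: repeatedly locate the next '-'/'.' with a helper, slice off the segment, filter it to its digits, collect nonempty groups and '.'-join them; the formatting tail is kept verbatim.
import Mathlib
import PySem

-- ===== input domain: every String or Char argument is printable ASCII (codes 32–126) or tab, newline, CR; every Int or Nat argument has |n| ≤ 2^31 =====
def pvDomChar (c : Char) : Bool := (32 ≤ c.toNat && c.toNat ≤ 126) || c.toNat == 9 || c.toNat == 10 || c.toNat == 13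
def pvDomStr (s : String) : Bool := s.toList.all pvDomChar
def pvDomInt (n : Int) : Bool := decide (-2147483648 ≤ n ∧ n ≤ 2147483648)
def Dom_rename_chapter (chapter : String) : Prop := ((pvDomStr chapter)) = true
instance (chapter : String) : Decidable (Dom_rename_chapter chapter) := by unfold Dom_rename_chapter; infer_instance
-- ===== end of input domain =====

-- B replaces A's char-by-char string/flag state machine by a staged cut-at-next-separator loop: repeatedly locate the next '-'/'.' , filter each segment to its digits, collect nonempty groups and '.'-join them (same values; objective: alternative decomposition).


-- ===== PORT A =====
-- Shared tail: the try/except formatting block is textually identical in Source A and Source B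
-- (Source B keeps A's tail verbatim), so both ports call this one transliteration of it.
-- f'Chapter {int(nn):03d}' / except: f'Chapter {nn.split(".",1)[0].zfill(3)}.{nn.split(".",1)[1]}'.
-- The '{n:03d}' format equals str(n).zfill(3) (sign kept in front) — exact.
-- nn.split(".",1)[1] can raise IndexError in Python only if int(nn) failed on a dot-free
-- string, which is unreachable here (nn is a nonempty digit/dot string); .getD [] is that
-- unreachable branch.
def chapTail (nn : List Char) : String :=
  match PySem.Int.ofChars? nn with
  | some n => String.ofList ("Chapter ".toList ++ PySem.Chars.zfill (PySem.Int.toChars n) 3)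
  | none =>
    String.ofList ("Chapter ".toList
      ++ PySem.Chars.zfill ((PySem.List.pyGet? (PySem.Chars.splitOnMax nn ['.'] 1) 0).getD []) 3
      ++ ['.'] ++ (PySem.List.pyGet? (PySem.Chars.splitOnMax nn ['.'] 1) 1).getD [])

-- A's loop body; st = (new_name, reached_number).  new_name[-1] is pyGet? st.1 (-1);
-- Python's short-circuit `and` means the index is only read when reached_number is true
-- (then new_name ≠ '' and pyGet? is some), so the total condition below is exact.
def stepA (st : List Char × Bool) (ch : Char) : List Char × Bool :=
  if PySem.Chars.isdigit ch then (st.1 ++ [ch], true)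
  else if (ch = '-' ∨ ch = '.') ∧ st.2 = true ∧ PySem.List.pyGet? st.1 (-1) ≠ some '.' then
    (st.1 ++ ['.'], st.2)
  else st

-- hand port of new_name.rstrip('.') (PySem has no right-only strip with chars): exact.
def rstripDot (nn : List Char) : List Char := (nn.reverse.dropWhile (· == '.')).reverse

def rename_chapter (chapter : String) : String :=
  -- chapter.split('-', 1)[1]; the [1] raises IndexError when '-' is absent → excluded by Pre_
  match PySem.List.pyGet? (PySem.Chars.splitOnMax chapter.toList ['-'] 1) 1 with
  | none => ""
  | some suf =>
    let st := suf.foldl stepA ([], false)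
    if st.2 = false then String.ofList suf
    else chapTail (rstripDot st.1)

-- ===== PORT B =====
-- _sep_index(s): first index of a '-' or '.' character, None if absent.
def sepIdx (s : List Char) : Option Nat := s.findIdx? (fun c => c = '-' || c = '.')

-- Source B's while-True loop: cut off the segment before the next separator, keep its digits
-- if any (parts.append), continue on the remainder; the final (separator-free) segment is
-- processed by the same body before the break.
def bloop (rest : List Char) (parts : List (List Char)) : List (List Char) :=
  match h : sepIdx rest with
  | none =>
      let g := rest.filter PySem.Chars.isdigit
      if g.isEmpty then parts else parts ++ [g]
  | some i =>
      let g := (rest.take i).filter PySem.Chars.isdigit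
      bloop (rest.drop (i + 1)) (if g.isEmpty then parts else parts ++ [g])
termination_by rest.length
decreasing_by
  have hi : i < rest.length := (List.findIdx?_eq_some_iff_findIdx_eq.mp h).1
  simp only [List.length_drop]; omega

def rename_chapter_alt (chapter : String) : String :=
  match PySem.List.pyGet? (PySem.Chars.splitOnMax chapter.toList ['-'] 1) 1 with
  | none => ""
  | some suf =>
    let parts := bloop suf []
    if parts.isEmpty then String.ofList suf
    else chapTail (PySem.Chars.join ['.'] parts)

-- ===== PRECONDITION & SPEC =====
-- Pre_ excludes exactly the inputs without '-', on which chapter.split('-',1)[1] raises IndexError.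
def Pre_rename_chapter (chapter : String) : Prop := PySem.Str.isIn "-" chapter = true
instance (chapter : String) : Decidable (Pre_rename_chapter chapter) := by unfold Pre_rename_chapter; infer_instance
def pvWitness_rename_chapter : String := "Vol 2 - Ch 10.5"

def Spec_rename_chapter (chapter : String) (out : String) : Prop := out = rename_chapter_alt chapter
instance (chapter : String) (out : String) : Decidable (Spec_rename_chapter chapter out) := by unfold Spec_rename_chapter; infer_instance

-- ===== CLAIM (what is proved, stated in full; the proofs are below) =====
def Claim_equal_rename_chapter : Prop := ∀ (chapter : String), Dom_rename_chapter chapter → Pre_rename_chapter chapter → Spec_rename_chapter chapter (rename_chapter chapter)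

-- ===== LEMMAS AND PROOFS =====

lemma digit_ne_dot (c : Char) (h : PySem.Chars.isdigit c = true) : c ≠ '.' := by
  rintro rfl; simp [PySem.Chars.isdigit] at h

lemma digit_ne_space (c : Char) (h : PySem.Chars.isdigit c = true) : c ≠ ' ' := by
  rintro rfl; simp [PySem.Chars.isdigit] at h

lemma digit_not_isspace (c : Char) (h : PySem.Chars.isdigit c = true) : PySem.Chars.isspace c = false := by
  simp [PySem.Chars.isdigit] at h
  obtain ⟨h1, h2⟩ := h
  have h1' : (48 : Nat) ≤ c.toNat := h1
  have h2' : c.toNat ≤ 57 := h2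
  simp [PySem.Chars.isspace]; omega

lemma pyget_concat (x : List Char) (d : Char) : PySem.List.pyGet? (x ++ [d]) (-1) = some d := by
  simp [PySem.List.pyGet?, PySem.List.pyIdx?]

lemma rstrip_last (l : List Char) (h : l.getLast? ≠ some '.') : rstripDot l = l := by
  unfold rstripDot
  cases hl : l.reverse with
  | nil => simp_all
  | cons a t =>
    have ha : l.getLast? = some a := by rw [← List.head?_reverse, hl]; rfl
    have : ¬ (a == '.') = true := by simp; rintro rfl; exact h ha
    rw [List.dropWhile_cons, if_neg this, ← hl, List.reverse_reverse]

lemma rstrip_dot (l : List Char) : rstripDot (l ++ ['.']) = rstripDot l := by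
  simp [rstripDot]

lemma interc_cons2 (a b : List Char) (A : List (List Char)) :
    List.intercalate ['.'] (a :: b :: A) = a ++ '.' :: List.intercalate ['.'] (b :: A) := by
  simp [List.intercalate]

lemma interc_snoc (A : List (List Char)) (g : List Char) (h : A ≠ []) :
    List.intercalate ['.'] (A ++ [g]) = List.intercalate ['.'] A ++ '.' :: g := by
  induction A with
  | nil => exact absurd rfl h
  | cons a A ih =>
    cases A with
    | nil => simp [List.intercalate]
    | cons b A' =>
      have := ih (by simp)
      simp only [List.cons_append] at this ⊢
      rw [interc_cons2, this, interc_cons2]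
      simp

lemma interc_snoc_snoc (A : List (List Char)) (g : List Char) (c : Char) :
    List.intercalate ['.'] (A ++ [g ++ [c]]) = List.intercalate ['.'] (A ++ [g]) ++ [c] := by
  cases A with
  | nil => simp [List.intercalate]
  | cons a A' =>
    rw [interc_snoc _ _ (by simp), interc_snoc _ _ (by simp)]
    simp

lemma last_interc (A : List (List Char)) (g : List Char) (hg : g ≠ []) :
    (List.intercalate ['.'] (A ++ [g])).getLast? = g.getLast? := by
  obtain ⟨g', d, rfl⟩ : ∃ g' d, g = g' ++ [d] :=
    ⟨g.dropLast, g.getLast hg, (List.dropLast_append_getLast hg).symm⟩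
  rw [interc_snoc_snoc, List.getLast?_concat, List.getLast?_concat]

lemma all_digit_last_ne_dot (g : List Char) (ha : g.all PySem.Chars.isdigit = true) :
    g.getLast? ≠ some '.' := by
  cases h : g.getLast? with
  | none => simp
  | some d =>
    have hd : d ∈ g := List.mem_of_getLast? h
    have := List.all_eq_true.mp ha d hd
    simp only [ne_eq, Option.some.injEq]
    rintro rfl
    exact digit_ne_dot _ this rfl

lemma go_nil (cur : List Char) (acc : List (List Char)) :
    PySem.Chars.split₀.go [] cur acc =
      if cur.isEmpty then acc.reverse else (cur.reverse :: acc).reverse := by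
  rw [PySem.Chars.split₀.go.eq_def]

lemma go_cons (c : Char) (rest cur : List Char) (acc : List (List Char)) :
    PySem.Chars.split₀.go (c :: rest) cur acc =
      if PySem.Chars.isspace c then
        (if cur.isEmpty then PySem.Chars.split₀.go rest [] acc
         else PySem.Chars.split₀.go rest [] (cur.reverse :: acc))
      else PySem.Chars.split₀.go rest (c :: cur) acc := by
  rw [PySem.Chars.split₀.go.eq_def]

-- proof device: the char-level image of one input char under B's staged pipeline
-- (digit → itself, separator → ' ', other → dropped); used only to state the bridge.
def bmap (c : Char) : Option Char :=
  if PySem.Chars.isdigit c then some c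
  else if c = '-' ∨ c = '.' then some ' '
  else none

lemma go_acc : ∀ (ms cur : List Char) (acc : List (List Char)),
    PySem.Chars.split₀.go ms cur acc = acc.reverse ++ PySem.Chars.split₀.go ms cur [] := by
  intro ms
  induction ms with
  | nil =>
    intro cur acc
    rw [go_nil, go_nil]
    split_ifs <;> simp
  | cons c rest ih =>
    intro cur acc
    rw [go_cons, go_cons]
    split_ifs with h1 h2
    · exact ih [] acc
    · rw [ih [] (cur.reverse :: acc), ih [] [cur.reverse]]
      simp
    · exact ih (c :: cur) acc

lemma go_nospace : ∀ (x rest cur : List Char) (acc : List (List Char)),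
    (∀ c ∈ x, PySem.Chars.isspace c = false) →
    PySem.Chars.split₀.go (x ++ rest) cur acc = PySem.Chars.split₀.go rest (x.reverse ++ cur) acc := by
  intro x
  induction x with
  | nil => intro rest cur acc _; simp
  | cons c t ih =>
    intro rest cur acc h
    rw [List.cons_append, go_cons, if_neg (by simp [h c (by simp)])]
    rw [ih rest (c :: cur) acc (fun d hd => h d (by simp [hd]))]
    simp

lemma split0_nosep (x : List Char) (hx : ∀ c ∈ x, PySem.Chars.isspace c = false) :
    PySem.Chars.split₀ x = if x.isEmpty then [] else [x] := by
  show PySem.Chars.split₀.go x [] [] = _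
  rw [(by simp : x = x ++ ([] : List Char)), go_nospace x [] [] [] hx, go_nil]
  simp

lemma split0_seg (ga mb : List Char) (hga : ∀ c ∈ ga, PySem.Chars.isspace c = false) :
    PySem.Chars.split₀ (ga ++ ' ' :: mb) =
      (if ga.isEmpty then [] else [ga]) ++ PySem.Chars.split₀ mb := by
  show PySem.Chars.split₀.go (ga ++ ' ' :: mb) [] [] = _
  rw [go_nospace ga (' ' :: mb) [] [] hga]
  simp only [List.append_nil]
  rw [go_cons, if_pos (by decide)]
  by_cases hg : ga = []
  · subst hg; simp [PySem.Chars.split₀]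
  · rw [if_neg (by simpa using hg)]
    rw [go_acc mb [] [ga.reverse.reverse]]
    simp [PySem.Chars.split₀, hg]

lemma filterMap_bmap_nosep (x : List Char) (hx : ∀ c ∈ x, ¬(c = '-' ∨ c = '.')) :
    x.filterMap bmap = x.filter PySem.Chars.isdigit := by
  induction x with
  | nil => rfl
  | cons c t ih =>
    rw [List.filterMap_cons, List.filter_cons,
      ih (fun d hd => hx d (by simp [hd]))]
    have hc := hx c (by simp)
    by_cases hd : PySem.Chars.isdigit c = true
    · simp [bmap, hd]
    · simp [bmap, hd, hc]

lemma nospace_filter_digits (x : List Char) :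
    ∀ c ∈ x.filter PySem.Chars.isdigit, PySem.Chars.isspace c = false := by
  intro c hc
  exact digit_not_isspace c (List.of_mem_filter hc)

lemma bloop_none (rest : List Char) (parts : List (List Char)) (hf : sepIdx rest = none) :
    bloop rest parts =
      (if (rest.filter PySem.Chars.isdigit).isEmpty then parts
       else parts ++ [rest.filter PySem.Chars.isdigit]) := by
  rw [bloop.eq_def]
  split
  · rfl
  · next i heq => rw [hf] at heq; cases heq

lemma bloop_some (rest : List Char) (parts : List (List Char)) (i : Nat)
    (hf : sepIdx rest = some i) :
    bloop rest parts =
      bloop (rest.drop (i + 1))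
        (if ((rest.take i).filter PySem.Chars.isdigit).isEmpty then parts
         else parts ++ [(rest.take i).filter PySem.Chars.isdigit]) := by
  rw [bloop.eq_def]
  split
  · next heq => rw [hf] at heq; cases heq
  · next j heq =>
    rw [hf] at heq
    cases heq
    rfl

lemma bloop_acc : ∀ (n : Nat) (rest : List Char), rest.length ≤ n →
    ∀ parts, bloop rest parts = parts ++ bloop rest [] := by
  intro n
  induction n with
  | zero =>
    intro rest h parts
    have : rest = [] := List.eq_nil_of_length_eq_zero (Nat.le_zero.mp h)
    subst this
    rw [bloop_none _ _ rfl, bloop_none _ _ rfl]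
    split_ifs <;> simp
  | succ n ih =>
    intro rest h parts
    cases hf : sepIdx rest with
    | none =>
      rw [bloop_none _ _ hf, bloop_none _ _ hf]
      split_ifs <;> simp
    | some i =>
      have hi : i < rest.length := (List.findIdx?_eq_some_iff_findIdx_eq.mp hf).1
      have hlen : (rest.drop (i + 1)).length ≤ n := by
        simp only [List.length_drop]; omega
      rw [bloop_some _ _ _ hf, bloop_some _ _ _ hf]
      split_ifs
      · exact ih _ hlen parts
      · rw [ih (rest.drop (i + 1)) hlen
            (parts ++ [(rest.take i).filter PySem.Chars.isdigit]),
          ih (rest.drop (i + 1)) hlen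
            ([] ++ [(rest.take i).filter PySem.Chars.isdigit])]
        simp

lemma bloop_eq : ∀ (n : Nat) (rest : List Char), rest.length ≤ n →
    bloop rest [] = PySem.Chars.split₀ (rest.filterMap bmap) := by
  intro n
  induction n with
  | zero =>
    intro rest h
    have : rest = [] := List.eq_nil_of_length_eq_zero (Nat.le_zero.mp h)
    subst this
    rw [bloop_none [] [] rfl]
    rfl
  | succ n ih =>
    intro rest h
    cases hf : sepIdx rest with
    | none =>
      rw [bloop_none _ _ hf]
      have hns : ∀ c ∈ rest, ¬(c = '-' ∨ c = '.') := by
        intro c hc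
        have := List.findIdx?_eq_none_iff.mp hf c hc
        simpa using this
      rw [filterMap_bmap_nosep rest hns,
        split0_nosep _ (nospace_filter_digits rest)]
      split_ifs with h1 h2 h2 <;> simp_all
    | some i =>
      rw [bloop_some _ _ _ hf]
      obtain ⟨hi, hpi, hlt⟩ := List.findIdx?_eq_some_iff_getElem.mp hf
      have hsep : rest[i] = '-' ∨ rest[i] = '.' := by
        rcases Bool.or_eq_true_iff.mp hpi with h1 | h1
        · left; exact decide_eq_true_eq.mp h1
        · right; exact decide_eq_true_eq.mp h1
      have hdec : rest = rest.take i ++ rest[i] :: rest.drop (i + 1) := by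
        rw [← List.drop_eq_getElem_cons hi, List.take_append_drop]
      have hnst : ∀ c ∈ rest.take i, ¬(c = '-' ∨ c = '.') := by
        intro c hc
        obtain ⟨j, hj, hj2, rfl⟩ := List.mem_take_iff_getElem.mp hc
        have := hlt j (by omega)
        simpa using this
      have hbsep : bmap rest[i] = some ' ' := by
        rcases hsep with h1 | h1 <;> rw [h1] <;> rfl
      conv_rhs => rw [hdec]
      rw [List.filterMap_append, List.filterMap_cons, hbsep,
        filterMap_bmap_nosep _ hnst]
      rw [split0_seg _ _ (nospace_filter_digits _)]
      have hlen : (rest.drop (i + 1)).length ≤ n := by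
        simp only [List.length_drop]; omega
      rw [← ih _ hlen]
      by_cases hg : ((rest.take i).filter PySem.Chars.isdigit).isEmpty = true
      · rw [if_pos hg, if_pos hg, bloop_acc n _ hlen []]
        simp
      · rw [if_neg hg, if_neg hg, bloop_acc n _ hlen ([] ++ [_])]
        simp

-- B's pipeline seen through A's state machine: A's fold equals the same machine
-- reading only digits and spaces (the bmap image).
def stepM (st : List Char × Bool) (c : Char) : List Char × Bool :=
  if c = ' ' then
    if st.2 = true ∧ PySem.List.pyGet? st.1 (-1) ≠ some '.' then (st.1 ++ ['.'], st.2) else st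
  else (st.1 ++ [c], true)

lemma foldA_eq_foldM (suf : List Char) : ∀ st : List Char × Bool,
    suf.foldl stepA st = (suf.filterMap bmap).foldl stepM st := by
  induction suf with
  | nil => intro st; rfl
  | cons c cs ih =>
    intro st
    rw [List.foldl_cons, List.filterMap_cons]
    by_cases hd : PySem.Chars.isdigit c = true
    · have hb : bmap c = some c := by simp [bmap, hd]
      rw [hb, List.foldl_cons, ih]
      congr 1
      simp [stepA, stepM, hd, digit_ne_space c hd]
    · by_cases hs : c = '-' ∨ c = '.'
      · have hb : bmap c = some ' ' := by simp [bmap, hd, hs]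
        rw [hb, List.foldl_cons, ih]
        congr 1
        show stepA st c = stepM st ' '
        simp [stepA, stepM, hd, hs]
      · have hb : bmap c = none := by simp [bmap, hd, hs]
        rw [hb, ih]
        congr 1
        simp [stepA, hd, hs]

lemma main_inv : ∀ (ms : List Char), (∀ c ∈ ms, c = ' ' ∨ PySem.Chars.isdigit c = true) →
    ∀ (cur : List Char) (acc : List (List Char)) (nn : List Char) (r : Bool),
    cur.all PySem.Chars.isdigit = true →
    (∀ g ∈ acc, g ≠ [] ∧ g.all PySem.Chars.isdigit = true) →
    ((cur = [] ∧ acc = [] ∧ nn = [] ∧ r = false) ∨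
     (cur ≠ [] ∧ nn = List.intercalate ['.'] (acc.reverse ++ [cur.reverse]) ∧ r = true) ∨
     (cur = [] ∧ acc ≠ [] ∧ nn = List.intercalate ['.'] acc.reverse ++ ['.'] ∧ r = true)) →
    (ms.foldl stepM (nn, r)).2 = decide (PySem.Chars.split₀.go ms cur acc ≠ []) ∧
      ((ms.foldl stepM (nn, r)).2 = true →
        rstripDot (ms.foldl stepM (nn, r)).1 =
          List.intercalate ['.'] (PySem.Chars.split₀.go ms cur acc)) := by
  intro ms
  induction ms with
  | nil =>
    intro _ cur acc nn r hcur hacc hinv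
    rw [go_nil]
    simp only [List.foldl_nil]
    rcases hinv with ⟨rfl, rfl, rfl, rfl⟩ | ⟨hc, rfl, rfl⟩ | ⟨rfl, hacc0, rfl, rfl⟩
    · simp
    · have hne : cur.isEmpty = false := by simpa using hc
      rw [hne]
      simp only [Bool.false_eq_true, if_false, List.reverse_cons]
      constructor
      · simp
      · intro _
        apply rstrip_last
        rw [last_interc _ _ (by simpa using hc)]
        exact all_digit_last_ne_dot _ (by simpa using hcur)
    · simp only [List.isEmpty_nil, if_true]
      constructor
      · simp [hacc0]
      · intro _
        obtain ⟨g, acc', rfl⟩ : ∃ g acc', acc = g :: acc' := by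
          cases acc with
          | nil => exact absurd rfl hacc0
          | cons g acc' => exact ⟨g, acc', rfl⟩
        have hg := hacc g (by simp)
        rw [rstrip_dot]
        apply rstrip_last
        rw [List.reverse_cons, last_interc _ _ hg.1]
        exact all_digit_last_ne_dot _ hg.2
  | cons c rest ih =>
    intro hms cur acc nn r hcur hacc hinv
    have hms' : ∀ x ∈ rest, x = ' ' ∨ PySem.Chars.isdigit x = true :=
      fun x hx => hms x (by simp [hx])
    rw [List.foldl_cons, go_cons]
    rcases hms c (by simp) with rfl | hdig
    · -- c = ' '
      rw [if_pos (by decide)]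
      rcases hinv with ⟨rfl, rfl, rfl, rfl⟩ | ⟨hc, rfl, rfl⟩ | ⟨rfl, hacc0, rfl, rfl⟩
      · have : stepM ([], false) ' ' = ([], false) := by simp [stepM]
        rw [this, if_pos (by simp)]
        exact ih hms' [] [] [] false (by simp) (by simp) (Or.inl (by simp))
      · obtain ⟨d, t, rfl⟩ : ∃ d t, cur = d :: t := by
          cases cur with
          | nil => exact absurd rfl hc
          | cons d t => exact ⟨d, t, rfl⟩
        have hd : PySem.Chars.isdigit d = true := by simp at hcur; exact hcur.1
        have hnn : List.intercalate ['.'] (acc.reverse ++ [(d :: t).reverse]) =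
            List.intercalate ['.'] (acc.reverse ++ [t.reverse]) ++ [d] := by
          rw [List.reverse_cons, interc_snoc_snoc]
        have hstep : stepM (List.intercalate ['.'] (acc.reverse ++ [(d :: t).reverse]), true) ' ' =
            (List.intercalate ['.'] (acc.reverse ++ [(d :: t).reverse]) ++ ['.'], true) := by
          have hcond : ((true : Bool) = true ∧
              PySem.List.pyGet? (List.intercalate ['.'] (acc.reverse ++ [(d :: t).reverse])) (-1) ≠ some '.') := by
            refine ⟨rfl, ?_⟩
            rw [hnn, pyget_concat]
            simp only [ne_eq, Option.some.injEq]
            intro h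
            exact digit_ne_dot d hd h
          unfold stepM
          rw [if_pos rfl, if_pos hcond]
        rw [hstep, if_neg (by simp)]
        refine ih hms' [] ((d :: t).reverse :: acc) _ true (by simp) ?_ ?_
        · intro g hg
          rcases List.mem_cons.mp hg with rfl | hg
          · exact ⟨by simp, by rw [List.all_reverse]; exact hcur⟩
          · exact hacc g hg
        · refine Or.inr (Or.inr ⟨rfl, by simp, ?_, rfl⟩)
          simp [List.reverse_cons]
      · have hstep : stepM (List.intercalate ['.'] acc.reverse ++ ['.'], true) ' ' =
            (List.intercalate ['.'] acc.reverse ++ ['.'], true) := by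
          simp [stepM]
        rw [hstep, if_pos (by simp)]
        exact ih hms' [] acc _ true (by simp) hacc (Or.inr (Or.inr ⟨rfl, hacc0, rfl, rfl⟩))
    · -- c digit
      rw [if_neg (by simp [digit_not_isspace c hdig])]
      have hstep : ∀ nn' r', stepM (nn', r') c = (nn' ++ [c], true) := by
        intro nn' r'; simp [stepM, digit_ne_space c hdig]
      rw [hstep]
      rcases hinv with ⟨rfl, rfl, rfl, rfl⟩ | ⟨hc, rfl, rfl⟩ | ⟨rfl, hacc0, rfl, rfl⟩
      · refine ih hms' [c] [] [c] true (by simp [hdig]) (by simp) ?_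
        refine Or.inr (Or.inl ⟨by simp, ?_, rfl⟩)
        simp [List.intercalate]
      · refine ih hms' (c :: cur) acc _ true (by simp [hdig, hcur]) hacc ?_
        refine Or.inr (Or.inl ⟨by simp, ?_, rfl⟩)
        rw [List.reverse_cons, interc_snoc_snoc]
      · refine ih hms' [c] acc _ true (by simp [hdig]) hacc ?_
        refine Or.inr (Or.inl ⟨by simp, ?_, rfl⟩)
        rw [interc_snoc _ _ (by simpa using hacc0)]
        simp

-- ===== VERDICT (by name: the statement is the Claim_ definition above) =====
theorem rename_chapter_spec : Claim_equal_rename_chapter := by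
  intro chapter _ _
  unfold Spec_rename_chapter rename_chapter rename_chapter_alt
  cases h : PySem.List.pyGet? (PySem.Chars.splitOnMax chapter.toList ['-'] 1) 1 with
  | none => rfl
  | some suf =>
    have hms : ∀ c ∈ suf.filterMap bmap, c = ' ' ∨ PySem.Chars.isdigit c = true := by
      intro c hc
      simp only [List.mem_filterMap] at hc
      obtain ⟨a, _, ha⟩ := hc
      unfold bmap at ha
      split_ifs at ha with h1 h2
      · cases ha; right; exact h1
      · cases ha; left; rfl
    have hfold := foldA_eq_foldM suf ([], false)
    have hmain := main_inv (suf.filterMap bmap) hms [] [] [] false (by simp) (by simp)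
      (Or.inl (by simp))
    have hbl : bloop suf [] = PySem.Chars.split₀ (suf.filterMap bmap) :=
      bloop_eq suf.length suf le_rfl
    have hsplit : PySem.Chars.split₀ (suf.filterMap bmap) =
        PySem.Chars.split₀.go (suf.filterMap bmap) [] [] := rfl
    obtain ⟨h2, h1⟩ := hmain
    simp only [hfold, hbl, hsplit]
    by_cases hp : PySem.Chars.split₀.go (suf.filterMap bmap) [] [] = []
    · rw [hp] at h2
      simp only [ne_eq, not_true_eq_false, decide_false] at h2
      rw [h2, if_pos rfl, hp]
      simp
    · rw [(by simpa using hp :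
          decide (PySem.Chars.split₀.go (suf.filterMap bmap) [] [] ≠ []) = true)] at h2
      rw [h2]
      rw [if_neg (by simp), if_neg (by simpa using hp), h1 h2]
      rfl
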